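-- pv_equiv track=rewrite | github.com/posl/comment_recommendation | script/mod_gen/5_time/ja/234_C/8.py | f
-- ===== SOURCE A (Python) =====
-- def f(k):
--     if k == 0:
--         return 0
--     if k == 1:
--         return 2
--     if k % 2 == 0:
--         return f(k//2) * 10 + 2
--     else:
--         return f(k//2) * 10
-- ===== SOURCE B (Python) =====
-- def f(k):
--     if k == 0:
--         return 0
--     b = bin(k)[2:]
--     return int('2' + ''.join('2' if c == '0' else '0' for c in b[1:]))
-- ===== Notes on version B (the rewrite author's own statement) =====
-- stated objective: idiomatic
-- what changed: Replaces the MSB-first recursion on k//2 with a single left-to-right pass over bin(k): the leading bit maps to digit 2 and each further bit maps 0->2 / 1->0, joined and parsed with int().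
import Mathlib
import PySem

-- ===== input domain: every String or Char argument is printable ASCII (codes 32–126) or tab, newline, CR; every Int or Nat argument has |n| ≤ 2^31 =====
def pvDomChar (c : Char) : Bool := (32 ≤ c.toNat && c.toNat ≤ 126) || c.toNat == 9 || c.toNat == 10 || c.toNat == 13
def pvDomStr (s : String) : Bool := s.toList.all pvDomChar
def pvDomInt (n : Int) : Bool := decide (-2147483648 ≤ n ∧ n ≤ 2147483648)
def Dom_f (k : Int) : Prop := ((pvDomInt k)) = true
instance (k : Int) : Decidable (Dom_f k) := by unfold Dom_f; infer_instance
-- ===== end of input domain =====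

-- B rewrites the MSB-first recursion as one pass over the binary string of k (idiomatic; same cost).

-- ===== PORT A =====
-- fuel makes the Int recursion total; for k ≥ 0 (= Pre_f) the fuel k.toNat+1 is never exhausted.
def fAux : Nat → Int → Int
  | 0, _ => 0
  | fuel + 1, k =>
    if k == 0 then 0
    else if k == 1 then 2
    else if PySem.Int.mod k 2 == 0 then fAux fuel (PySem.Int.floordiv k 2) * 10 + 2
    else fAux fuel (PySem.Int.floordiv k 2) * 10

def f (k : Int) : Int := fAux (k.toNat + 1) k

-- ===== PORT B =====
-- binary digit chars of n, MSB first (n > 0); [] for n = 0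
def binChars (n : Nat) : List Char :=
  if n = 0 then [] else binChars (n / 2) ++ [if n % 2 = 0 then '0' else '1']

-- bin(k) for k ≠ 0: optional '-', then '0b', then the digits
def binRepr (k : Int) : List Char :=
  (if k < 0 then ['-'] else []) ++ ['0', 'b'] ++ binChars k.natAbs

def trChar (c : Char) : Char := if c = '0' then '2' else '0'

-- int() on a string of decimal digit chars
def strToInt (cs : List Char) : Int := cs.foldl (fun acc c => acc * 10 + ((c.toNat : Int) - 48)) 0

def f_alt (k : Int) : Int :=
  if k = 0 then 0
  else strToInt ('2' :: (((binRepr k).drop 2).drop 1).map trChar)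

-- ===== PRECONDITION & SPEC =====
-- A recurses forever (RecursionError) on k < 0; Pre_f keeps exactly the inputs where A returns.
def Pre_f (k : Int) : Prop := 0 ≤ k
instance (k : Int) : Decidable (Pre_f k) := by unfold Pre_f; infer_instance
def pvWitness_f : Int := 6

def Spec_f (k : Int) (out : Int) : Prop := out = f_alt k
instance (k : Int) (out : Int) : Decidable (Spec_f k out) := by unfold Spec_f; infer_instance

-- ===== CLAIM (what is proved, stated in full; the proofs are below) =====
def Claim_equal_f : Prop := ∀ (k : Int), Dom_f k → Pre_f k → Spec_f k (f k)

-- ===== LEMMAS AND PROOFS =====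

-- common mathematical reference function on Nat
def h (n : Nat) : Int :=
  if n = 0 then 0
  else if n = 1 then 2
  else if n % 2 = 0 then h (n / 2) * 10 + 2 else h (n / 2) * 10

theorem fAux_eq_h : ∀ (fuel n : Nat), n < fuel → fAux fuel (n : Int) = h n := by
  intro fuel
  induction fuel with
  | zero => intro n hn; omega
  | succ m ih =>
    intro n hn
    by_cases h0 : n = 0
    · subst h0; rw [h]; simp [fAux]
    by_cases h1 : n = 1
    · subst h1; rw [h]; simp [fAux]
    have hmod : PySem.Int.mod (n : Int) 2 = ((n % 2 : Nat) : Int) := PySem.Int.mod_natCast n 2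
    have hdiv : PySem.Int.floordiv (n : Int) 2 = ((n / 2 : Nat) : Int) := PySem.Int.floordiv_natCast n 2
    have hrec : fAux m (PySem.Int.floordiv (n : Int) 2) = h (n / 2) := by
      rw [hdiv]; exact ih (n / 2) (by omega)
    have c0 : ((n : Int) == 0) = false := by simp; exact_mod_cast h0
    have c1 : ((n : Int) == 1) = false := by simp; exact_mod_cast h1
    rw [show fAux (m + 1) (n : Int) =
        (if (n : Int) == 0 then 0
         else if (n : Int) == 1 then 2
         else if PySem.Int.mod (n : Int) 2 == 0 then
           fAux m (PySem.Int.floordiv (n : Int) 2) * 10 + 2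
         else fAux m (PySem.Int.floordiv (n : Int) 2) * 10) from rfl]
    rw [c0, c1]
    conv_rhs => rw [h]
    rw [if_neg h0, if_neg h1]
    have hcast : ((n : Int)) / 2 = ((n / 2 : Nat) : Int) := by exact_mod_cast (Int.natCast_div n 2).symm
    by_cases he : n % 2 = 0
    · have c2 : (PySem.Int.mod (n : Int) 2 == 0) = true := by rw [hmod]; simp [he]
      rw [c2]; simp [he]; rw [hcast]; exact ih (n / 2) (by omega)
    · have c2 : (PySem.Int.mod (n : Int) 2 == 0) = false := by rw [hmod]; simp; omega
      rw [c2]; simp [he]; rw [hcast]; exact ih (n / 2) (by omega)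

theorem binChars_ne_nil (n : Nat) (hn : n ≠ 0) : binChars n ≠ [] := by
  rw [binChars]; simp [hn]

theorem strToInt_append_one (xs : List Char) (c : Char) :
    strToInt (xs ++ [c]) = strToInt xs * 10 + ((c.toNat : Int) - 48) := by
  simp [strToInt, List.foldl_append]

theorem alt_eq_h : ∀ (n : Nat), n ≠ 0 →
    strToInt ('2' :: ((binChars n).drop 1).map trChar) = h n := by
  intro n
  induction n using Nat.strong_induction_on with
  | _ n ih =>
    intro hn
    by_cases h1 : n = 1
    · subst h1
      have b0 : binChars 0 = [] := by rw [binChars]; simp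
      have b1 : binChars 1 = ['1'] := by rw [binChars]; norm_num [b0]
      rw [b1, h]
      norm_num [strToInt]
      decide
    have h2 : 2 ≤ n := by omega
    rw [binChars, if_neg hn]
    have hne : binChars (n / 2) ≠ [] := binChars_ne_nil (n / 2) (by omega)
    obtain ⟨a, t, ht⟩ : ∃ a t, binChars (n / 2) = a :: t := by
      cases hbc : binChars (n / 2) with
      | nil => exact absurd hbc hne
      | cons a t => exact ⟨a, t, rfl⟩
    rw [ht]
    have ihh : strToInt ('2' :: ((binChars (n / 2)).drop 1).map trChar) = h (n / 2) :=
      ih (n / 2) (by omega) (by omega)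
    rw [ht] at ihh
    simp only [List.drop_succ_cons, List.drop_zero] at ihh
    simp only [List.cons_append, List.drop_succ_cons, List.drop_zero, List.map_append]
    rw [show ('2' :: (t.map trChar ++ ([if n % 2 = 0 then '0' else '1'].map trChar))) =
        ('2' :: t.map trChar) ++ ([if n % 2 = 0 then '0' else '1'].map trChar) from rfl]
    simp only [List.map_cons, List.map_nil]
    rw [strToInt_append_one, ihh]
    conv_rhs => rw [h]
    rw [if_neg hn, if_neg h1]
    by_cases he : n % 2 = 0
    · simp only [he, trChar, if_pos]
      norm_num
      decide
    · rw [if_neg he, if_neg he]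
      simp [trChar]

-- ===== VERDICT (by name: the statement is the Claim_ definition above) =====
theorem f_spec : Claim_equal_f := by
  intro k _ hpre
  unfold Spec_f f f_alt
  obtain ⟨n, rfl⟩ : ∃ n : Nat, k = (n : Int) := ⟨k.toNat, (Int.toNat_of_nonneg hpre).symm⟩
  by_cases h0 : n = 0
  · subst h0; simp [fAux]
  · rw [if_neg (by exact_mod_cast h0)]
    have hlt : ¬ ((n : Int) < 0) := by omega
    have hrepr : ((binRepr (n : Int)).drop 2) = binChars n := by
      rw [binRepr, if_neg hlt]
      simp
    rw [hrepr]
    have : (n : Int).toNat = n := Int.toNat_natCast n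
    rw [this, fAux_eq_h (n + 1) n (by omega), alt_eq_h n h0]
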